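-- pv_equiv track=rewrite | github.com/otheobaldo/algoritmoslista5 | algoritmoslista6/FRM-Alg-06-Ex-10.py | formatarLista
-- ===== SOURCE A (Python) =====
-- def formatarLista(lista):
--     frase = ""
--     i = 1
--
--     for item in lista:
--         if i == 1:
--             frase = item
--             i = i + 1
--         elif i == len(lista):
--             frase = frase + " e " + item
--         else:
--             i = i + 1
--             frase = frase + ", " + item
--     return frase
-- ===== SOURCE B (Python) =====
-- def formatarLista(lista):
--     if not lista:
--         return ""
--     if len(lista) == 1:
--         return lista[0]
--     return ", ".join(lista[:-1]) + " e " + lista[-1]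
-- ===== Notes on version B (the rewrite author's own statement) =====
-- stated objective: idiomatic
-- what changed: Replaces A's counter-driven loop that rebuilds the result string by repeated concatenation with two explicit edge cases plus ', '.join(lista[:-1]) + ' e ' + lista[-1].
import Mathlib
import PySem

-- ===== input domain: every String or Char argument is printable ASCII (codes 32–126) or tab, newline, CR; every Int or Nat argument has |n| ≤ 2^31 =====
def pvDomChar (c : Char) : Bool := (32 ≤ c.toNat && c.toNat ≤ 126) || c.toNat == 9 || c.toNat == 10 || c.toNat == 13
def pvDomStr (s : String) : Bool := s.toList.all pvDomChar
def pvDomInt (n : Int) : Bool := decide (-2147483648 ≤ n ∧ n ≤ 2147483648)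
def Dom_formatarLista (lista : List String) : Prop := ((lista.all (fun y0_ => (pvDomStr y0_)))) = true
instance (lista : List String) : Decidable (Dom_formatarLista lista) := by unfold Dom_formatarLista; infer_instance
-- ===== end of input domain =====

-- B replaces A's counter-driven per-element branching loop by two explicit edge cases plus
-- ', '.join(lista[:-1]) + ' e ' + lista[-1] (idiomatic; same cost).

-- ===== PORT A =====
def formatarLista (lista : List String) : String :=
  (lista.foldl
    (fun (s : String × Int) (item : String) =>
      if s.2 = 1 then (item, s.2 + 1)
      else if s.2 = (lista.length : Int) then (s.1 ++ " e " ++ item, s.2)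
      else (s.1 ++ ", " ++ item, s.2 + 1))
    ("", 1)).1

-- ===== PORT B =====
-- pyGet? cannot be none in its branches (index 0 on a nonempty list, -1 on length ≥ 2),
-- so .getD "" is exact: Python's indexing cannot raise there.
def formatarLista_alt (lista : List String) : String :=
  if lista.length = 0 then ""
  else if lista.length = 1 then (PySem.List.pyGet? lista 0).getD ""
  else PySem.Str.join ", " (PySem.List.slice lista none (some (-1)))
         ++ " e " ++ (PySem.List.pyGet? lista (-1)).getD ""

-- ===== PRECONDITION & SPEC =====
def Spec_formatarLista (lista : List String) (out : String) : Prop := out = formatarLista_alt lista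
instance (lista : List String) (out : String) : Decidable (Spec_formatarLista lista out) := by unfold Spec_formatarLista; infer_instance

-- ===== CLAIM (what is proved, stated in full; the proofs are below) =====
def Claim_equal_formatarLista : Prop := ∀ (lista : List String), Dom_formatarLista lista → Spec_formatarLista lista (formatarLista lista)

-- ===== LEMMAS AND PROOFS =====

-- the text A's loop appends after the first element
def pvTailFmt : List String → String
  | [] => ""
  | [y] => " e " ++ y
  | y :: z :: zs => ", " ++ y ++ pvTailFmt (z :: zs)

-- A's loop body, with the total length n fixed
def pvStepA (n : Nat) (s : String × Int) (item : String) : String × Int :=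
  if s.2 = 1 then (item, s.2 + 1)
  else if s.2 = (n : Int) then (s.1 ++ " e " ++ item, s.2)
  else (s.1 ++ ", " ++ item, s.2 + 1)

theorem pvFoldA (n : Nat) :
    ∀ (r : List String), r ≠ [] → r.length < n → ∀ frase : String,
      (r.foldl (pvStepA n) (frase, (n : Int) - r.length + 1)).1 = frase ++ pvTailFmt r := by
  intro r
  induction r with
  | nil => intro h; exact absurd rfl h
  | cons y r ih =>
    intro _ hlen frase
    cases r with
    | nil =>
      have hn : 1 < n := by simpa using hlen
      have h1 : (n : Int) - (([y] : List String).length : Int) + 1 = (n : Int) := by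
        simp
      rw [h1, List.foldl_cons]
      have hstep : pvStepA n (frase, (n : Int)) y = (frase ++ " e " ++ y, (n : Int)) := by
        unfold pvStepA
        rw [if_neg (by omega), if_pos rfl]
      rw [hstep]
      simp [pvTailFmt, String.append_assoc]
    | cons z zs =>
      have hlen2 : zs.length + 2 < n := by simpa using hlen
      have hlen' : (z :: zs).length < n := by simp; omega
      have e1 : ¬ ((n : Int) - ((y :: z :: zs).length : Int) + 1 = 1) := by
        simp only [List.length_cons]; push_cast; omega
      have e2 : ¬ ((n : Int) - ((y :: z :: zs).length : Int) + 1 = (n : Int)) := by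
        simp only [List.length_cons]; push_cast; omega
      rw [List.foldl_cons]
      have hstep : pvStepA n (frase, (n : Int) - ((y :: z :: zs).length : Int) + 1)
          y = (frase ++ ", " ++ y, (n : Int) - ((z :: zs).length : Int) + 1) := by
        unfold pvStepA
        rw [if_neg e1, if_neg e2]
        refine Prod.ext rfl ?_
        simp only [List.length_cons]; push_cast; omega
      rw [hstep, ih (by simp) hlen' (frase ++ ", " ++ y)]
      simp [pvTailFmt, String.append_assoc]

theorem pvJoin_cons₂ (x y : String) (xs : List String) :
    PySem.Str.join ", " (x :: y :: xs) = x ++ ", " ++ PySem.Str.join ", " (y :: xs) := by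
  apply String.toList_inj.mp
  simp [PySem.Str.join, PySem.Chars.join_cons_cons]

theorem pvJoin_single (x : String) : PySem.Str.join ", " [x] = x := by
  apply String.toList_inj.mp
  simp [PySem.Str.join, PySem.Chars.join_singleton]

theorem pvFoldB : ∀ (zs : List String) (x y : String),
    PySem.Str.join ", " ((x :: y :: zs).dropLast) ++ " e "
      ++ ((y :: zs).getLast?.getD "") = x ++ pvTailFmt (y :: zs) := by
  intro zs
  induction zs with
  | nil =>
    intro x y
    simp [pvJoin_single, pvTailFmt, String.append_assoc]
  | cons z zs ih =>
    intro x y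
    have hdl : (x :: y :: z :: zs).dropLast = x :: ((y :: z :: zs).dropLast) := rfl
    have hdl2 : (y :: z :: zs).dropLast = y :: ((z :: zs).dropLast) := rfl
    have hl : (y :: z :: zs).getLast? = (z :: zs).getLast? := by
      simp [List.getLast?_cons_cons]
    rw [hdl, hdl2, pvJoin_cons₂, hl]
    have hih := ih y z
    rw [hdl2] at hih
    simp only [String.append_assoc] at hih ⊢
    rw [hih]
    simp [pvTailFmt, String.append_assoc]

-- ===== VERDICT (by name: the statement is the Claim_ definition above) =====
theorem formatarLista_spec : Claim_equal_formatarLista := by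
  intro lista _
  unfold Spec_formatarLista formatarLista formatarLista_alt
  match lista with
  | [] => rfl
  | [x] => rfl
  | x :: y :: zs =>
    have hstep : (List.foldl
        (fun (s : String × Int) (item : String) =>
          if s.2 = 1 then (item, s.2 + 1)
          else if s.2 = ((x :: y :: zs).length : Int) then (s.1 ++ " e " ++ item, s.2)
          else (s.1 ++ ", " ++ item, s.2 + 1)) ("", 1) (x :: y :: zs))
        = (List.foldl (pvStepA (x :: y :: zs).length) ("", 1) (x :: y :: zs)) := rfl
    have h0 : (List.foldl (pvStepA (x :: y :: zs).length) ("", 1) (x :: y :: zs))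
        = (y :: zs).foldl (pvStepA (x :: y :: zs).length) (x, 2) := by
      simp [List.foldl_cons, pvStepA]
    have h2 : ((x :: y :: zs).length : Int) - ((y :: zs).length : Int) + 1 = 2 := by
      simp only [List.length_cons]; push_cast; omega
    have hA : ((x :: y :: zs).foldl (pvStepA (x :: y :: zs).length) ("", 1)).1
        = x ++ pvTailFmt (y :: zs) := by
      rw [h0, ← h2, pvFoldA _ _ (by simp) (by simp)]
    rw [hstep, hA]
    rw [if_neg (by simp), if_neg (by simp)]
    rw [PySem.List.slice_to_neg_one, PySem.List.pyGet?_neg_one]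
    have hl : (x :: y :: zs).getLast? = (y :: zs).getLast? := by
      simp [List.getLast?_cons_cons]
    rw [hl, pvFoldB]
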